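-- pv_equiv track=rewrite | github.com/wronai/code2logic | code2logic/shared_utils.py | deduplicate_imports
-- ===== SOURCE A (Python) =====
-- from typing import Dict, List, Optional, Set
--
-- def deduplicate_imports(imports: List[str]) -> List[str]:
--     """
--     Remove redundant imports.
--
--     Example:
--         ['typing', 'typing.Dict'] -> ['typing.Dict']
--
--     Args:
--         imports: List of import strings
--
--     Returns:
--         Deduplicated import list
--     """
--     if not imports:
--         return []
--
--     seen_bases: Set[str] = set()
--     result: List[str] = []
--
--     # Sort by specificity (more dots = more specific)
--     sorted_imports = sorted(imports, key=lambda x: -x.count('.'))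
--
--     for imp in sorted_imports:
--         base = imp.split('.')[0]
--         # If we have a more specific import, skip the base
--         if imp == base and base in seen_bases:
--             continue
--         result.append(imp)
--         seen_bases.add(base)
--
--     return result
-- ===== SOURCE B (Python) =====
-- from typing import List
--
--
-- def deduplicate_imports(imports: List[str]) -> List[str]:
--     """Partition into dotted/bare once, sort only the dotted sublist, then
--     append bare names not covered by a dotted import (deduplicated)."""
--     if not imports:
--         return []
--
--     dotted = [x for x in imports if x.count('.') != 0]
--     bare = [x for x in imports if x.count('.') == 0]
--
--     specific = {x.split('.')[0] for x in dotted}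
--
--     result = sorted(dotted, key=lambda x: -x.count('.'))
--     emitted = set()
--     for name in bare:
--         if name not in specific and name not in emitted:
--             result.append(name)
--             emitted.add(name)
--     return result
-- ===== Notes on version B (the rewrite author's own statement) =====
-- stated objective: alternative
-- what changed: B partitions the list once into dotted/bare names, sorts only the dotted sublist by descending dot count, and appends bare names filtered against a precomputed set of covered bases plus a running emitted set, instead of A's single stable sort of the whole list with an online seen_bases set.
import Mathlib
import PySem

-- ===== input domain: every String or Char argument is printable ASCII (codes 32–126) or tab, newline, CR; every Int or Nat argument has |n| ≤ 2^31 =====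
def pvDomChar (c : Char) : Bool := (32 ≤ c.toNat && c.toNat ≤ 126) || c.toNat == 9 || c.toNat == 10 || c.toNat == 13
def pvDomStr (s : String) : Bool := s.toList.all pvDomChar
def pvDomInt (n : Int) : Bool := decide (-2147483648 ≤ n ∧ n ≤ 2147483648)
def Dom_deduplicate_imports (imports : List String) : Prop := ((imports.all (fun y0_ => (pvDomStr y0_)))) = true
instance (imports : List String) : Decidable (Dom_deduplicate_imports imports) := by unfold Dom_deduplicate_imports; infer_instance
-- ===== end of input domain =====

-- B partitions the list once into dotted/bare, sorts only the dotted sublist and filters the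
-- bare names against a precomputed 'covered bases' set (objective: alternative decomposition).

-- ===== PORT A =====
-- imp.split('.')[0]: split? with separator "." is never none and never returns an empty list,
-- so the [0] indexing never raises; the two getD defaults are unreachable.
def pyBase (imp : String) : String :=
  (PySem.List.pyGet? ((PySem.Str.split? imp ".").getD []) 0).getD ""

-- the body of A's for-loop, state = (seen_bases, result)
def dedupStep (st : PySem.Set String × List String) (imp : String) :
    PySem.Set String × List String :=
  let base := pyBase imp
  if imp == base && PySem.Set.contains st.1 base then st
  else (PySem.Set.add st.1 base, st.2 ++ [imp])

def deduplicate_imports (imports : List String) : List String :=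
  if imports = [] then []
  else
    ((PySem.List.sorted imports (fun x => -(PySem.Str.count x "." : Int)) false).foldl
      dedupStep (PySem.Set.empty, [])).2

-- ===== PORT B =====
-- the body of B's for-loop over the bare names, state = (emitted, result)
def bareStep (specific : PySem.Set String) (st : PySem.Set String × List String)
    (name : String) : PySem.Set String × List String :=
  if !PySem.Set.contains specific name && !PySem.Set.contains st.1 name then
    (PySem.Set.add st.1 name, st.2 ++ [name])
  else st

def deduplicate_imports_alt (imports : List String) : List String :=
  if imports = [] then []
  else
    let dotted := imports.filter (fun x => PySem.Str.count x "." != 0)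
    let bare := imports.filter (fun x => PySem.Str.count x "." == 0)
    let specific := PySem.Set.ofList (dotted.map pyBase)
    let result := PySem.List.sorted dotted (fun x => -(PySem.Str.count x "." : Int)) false
    (bare.foldl (bareStep specific) (PySem.Set.empty, result)).2

-- ===== PRECONDITION & SPEC =====
def Spec_deduplicate_imports (imports : List String) (out : List String) : Prop := out = deduplicate_imports_alt imports
instance (imports : List String) (out : List String) : Decidable (Spec_deduplicate_imports imports out) := by unfold Spec_deduplicate_imports; infer_instance

-- ===== CLAIM (what is proved, stated in full; the proofs are below) =====
def Claim_equal_deduplicate_imports : Prop := ∀ (imports : List String), Dom_deduplicate_imports imports → Spec_deduplicate_imports imports (deduplicate_imports imports)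

-- ===== LEMMAS AND PROOFS =====

-- s.count('.') counts the dots
theorem countGo_dot (s : List Char) : ∀ (fuel acc : Nat), s.length ≤ fuel →
    PySem.Chars.count.go ['.'] fuel s acc = acc + s.count '.' := by
  induction s with
  | nil =>
    intro fuel acc _
    cases fuel <;> simp [PySem.Chars.count.go]
  | cons c r ih =>
    intro fuel acc hle
    cases fuel with
    | zero => simp at hle
    | succ k =>
      have hk : r.length ≤ k := by simpa using hle
      by_cases hc : c = '.'
      · subst hc
        have : PySem.Chars.count.go ['.'] (k+1) ('.'::r) acc
            = PySem.Chars.count.go ['.'] k r (acc+1) := by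
          simp [PySem.Chars.count.go, List.isPrefixOf]
        rw [this, ih k (acc+1) hk]
        simp
        omega
      · have : PySem.Chars.count.go ['.'] (k+1) (c::r) acc
            = PySem.Chars.count.go ['.'] k r acc := by
          simp [PySem.Chars.count.go, List.isPrefixOf, Ne.symm hc]
        rw [this, ih k acc hk]
        simp [hc]

theorem count_dot (x : String) : PySem.Str.count x "." = x.toList.count '.' := by
  have h : (".").toList = ['.'] := rfl
  simp only [PySem.Str.count, h, PySem.Chars.count]
  rw [if_neg (by simp), countGo_dot x.toList x.toList.length 0 (le_refl _)]
  simp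

-- the first piece of s.split('.') is the prefix of s before the first dot
theorem splitGo_head (s : List Char) : ∀ (fuel : Nat) (cur : List Char) (acc : List (List Char)),
    s.length < fuel →
    ∃ rest, PySem.Chars.splitOn.go ['.'] fuel s cur acc
      = acc.reverse ++ (cur.reverse ++ s.takeWhile (fun c => c != '.')) :: rest := by
  induction s with
  | nil =>
    intro fuel cur acc hf
    cases fuel with
    | zero => omega
    | succ k => exact ⟨[], by simp [PySem.Chars.splitOn.go]⟩
  | cons c r ih =>
    intro fuel cur acc hf
    cases fuel with
    | zero => omega
    | succ k =>
      have hk : r.length < k := by simpa using hf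
      by_cases hc : c = '.'
      · subst hc
        have heq : PySem.Chars.splitOn.go ['.'] (k+1) ('.'::r) cur acc
            = PySem.Chars.splitOn.go ['.'] k r [] (cur.reverse :: acc) := by
          simp [PySem.Chars.splitOn.go, List.isPrefixOf]
        obtain ⟨rest', hr⟩ := ih k [] (cur.reverse :: acc) hk
        refine ⟨r.takeWhile (fun c => c != '.') :: rest', ?_⟩
        rw [heq, hr]
        simp
      · have heq : PySem.Chars.splitOn.go ['.'] (k+1) (c::r) cur acc
            = PySem.Chars.splitOn.go ['.'] k r (c::cur) acc := by
          simp [PySem.Chars.splitOn.go, List.isPrefixOf, Ne.symm hc]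
        obtain ⟨rest', hr⟩ := ih k (c::cur) acc hk
        refine ⟨rest', ?_⟩
        rw [heq, hr]
        simp [hc]

theorem pyBase_eq (x : String) :
    pyBase x = String.ofList (x.toList.takeWhile (fun c => c != '.')) := by
  have h : (".").toList = ['.'] := rfl
  obtain ⟨rest, hr⟩ := splitGo_head x.toList (x.toList.length + 1) [] []
    (by omega)
  simp only [pyBase, PySem.Str.split?, PySem.Chars.split?, h]
  simp only [List.isEmpty_cons, if_neg Bool.false_ne_true, PySem.Chars.splitOn, hr]
  simp [PySem.List.pyGet?, PySem.List.pyIdx?]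

theorem base_self (x : String) (h : PySem.Str.count x "." = 0) : pyBase x = x := by
  rw [pyBase_eq]
  have hnm : '.' ∉ x.toList := by
    rw [count_dot] at h
    exact List.count_eq_zero.mp h
  have : x.toList.takeWhile (fun c => c != '.') = x.toList := by
    rw [List.takeWhile_eq_self_iff]
    intro c hc
    simp only [bne_iff_ne, ne_eq]
    exact fun hcd => hnm (hcd ▸ hc)
  rw [this]
  exact String.ofList_toList

theorem base_ne (x : String) (h : PySem.Str.count x "." ≠ 0) : pyBase x ≠ x := by
  intro heq
  have hm : '.' ∈ x.toList := by
    rw [count_dot] at h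
    exact List.count_pos_iff.mp (Nat.pos_of_ne_zero h)
  rw [pyBase_eq] at heq
  have : x.toList = x.toList.takeWhile (fun c => c != '.') := by
    conv_lhs => rw [← heq]
    rw [String.toList_ofList]
  rw [this] at hm
  have := List.mem_takeWhile_imp hm
  simp at this

-- insertion into a concatenation lands in the left part when x sorts before all of the right part
theorem insertBy_append {α : Type} (before : α → α → Bool) (x : α) :
    ∀ (D B : List α), (∀ y ∈ B, before x y = true) →
    PySem.List.insertBy before x (D ++ B) = PySem.List.insertBy before x D ++ B := by
  intro D
  induction D with
  | nil =>
    intro B hB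
    cases B with
    | nil => simp [PySem.List.insertBy]
    | cons b bs => simp [PySem.List.insertBy, hB b (by simp)]
  | cons d D' ih =>
    intro B hB
    by_cases hd : before x d = true
    · simp [PySem.List.insertBy, hd]
    · simp only [Bool.not_eq_true] at hd
      simp [PySem.List.insertBy, hd, ih B hB]

-- the stable sort by descending dot count is: sort of the dotted sublist, then the bare names in order
theorem sort_split :
    ∀ (xs D B : List String), (∀ y ∈ B, PySem.Str.count y "." = 0) →
    xs.foldl (fun acc x => PySem.List.insertBy
        (fun a b => decide (-(PySem.Str.count a "." : Int) < -(PySem.Str.count b "." : Int))) x acc) (D ++ B)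
    = (xs.filter (fun x => PySem.Str.count x "." != 0)).foldl (fun acc x => PySem.List.insertBy
        (fun a b => decide (-(PySem.Str.count a "." : Int) < -(PySem.Str.count b "." : Int))) x acc) D
      ++ (B ++ xs.filter (fun x => !(PySem.Str.count x "." != 0))) := by
  intro xs
  induction xs with
  | nil => intro D B _; simp
  | cons x xs ih =>
    intro D B hB
    by_cases hx : PySem.Str.count x "." = 0
    · -- bare: appended at the very end (its key 0 is maximal, keys are ≤ 0)
      have hins : PySem.List.insertBy
          (fun a b => decide (-(PySem.Str.count a "." : Int) < -(PySem.Str.count b "." : Int))) x (D ++ B)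
          = (D ++ B) ++ [x] := by
        apply PySem.List.insertBy_of_forall_not_before
        intro y _
        simp only [decide_eq_false_iff_not, not_lt, hx]
        omega
      have hB' : ∀ y ∈ B ++ [x], PySem.Str.count y "." = 0 := by
        intro y hy
        rcases List.mem_append.mp hy with h | h
        · exact hB y h
        · simp at h; subst h; exact hx
      have hx' : PySem.Chars.count x.toList ['.'] = 0 := by
        simpa [PySem.Str.count] using hx
      simp only [List.foldl_cons, hins, List.append_assoc]
      rw [ih D (B ++ [x]) hB']
      simp [hx']
    · -- dotted: inserted inside the D part (every bare key 0 is strictly larger)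
      have hins : PySem.List.insertBy
          (fun a b => decide (-(PySem.Str.count a "." : Int) < -(PySem.Str.count b "." : Int))) x (D ++ B)
          = PySem.List.insertBy
            (fun a b => decide (-(PySem.Str.count a "." : Int) < -(PySem.Str.count b "." : Int))) x D ++ B := by
        apply insertBy_append
        intro y hy
        rw [hB y hy]
        simp only [decide_eq_true_eq]
        omega
      have hx' : ¬ PySem.Chars.count x.toList ['.'] = 0 := by
        simpa [PySem.Str.count] using hx
      simp only [List.foldl_cons, hins]
      rw [ih _ B hB]
      simp [hx']

-- A's loop over the dotted phase: everything is appended, the bases are collected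
theorem phase1 : ∀ (l : List String) (st : PySem.Set String × List String),
    (∀ x ∈ l, PySem.Str.count x "." ≠ 0) →
    l.foldl dedupStep st
      = (l.foldl (fun s x => PySem.Set.add s (pyBase x)) st.1, st.2 ++ l) := by
  intro l
  induction l with
  | nil => intro st _; simp
  | cons x l ih =>
    intro st hl
    have hx := hl x (by simp)
    have hne : (x == pyBase x) = false := by
      simp [Ne.symm (base_ne x hx)]
    simp only [List.foldl_cons]
    rw [show dedupStep st x = (PySem.Set.add st.1 (pyBase x), st.2 ++ [x]) by
      simp [dedupStep, hne]]
    rw [ih _ (fun y hy => hl y (by simp [hy]))]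
    simp

-- A's loop over the bare phase agrees with B's loop whenever 'seen' is 'specific ∪ emitted'
theorem phase2 : ∀ (l : List String) (specific seen emitted : PySem.Set String)
    (res : List String),
    (∀ x ∈ l, PySem.Str.count x "." = 0) →
    (∀ y : String, y ∈ seen ↔ y ∈ specific ∨ y ∈ emitted) →
    (l.foldl dedupStep (seen, res)).2 = (l.foldl (bareStep specific) (emitted, res)).2 := by
  intro l
  induction l with
  | nil => intro specific seen emitted res _ _; simp
  | cons x l ih =>
    intro specific seen emitted res hl hinv
    have hx : pyBase x = x := base_self x (hl x (by simp))
    have hl' : ∀ y ∈ l, PySem.Str.count y "." = 0 := fun y hy => hl y (by simp [hy])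
    simp only [List.foldl_cons]
    by_cases hmem : x ∈ specific ∨ x ∈ emitted
    · -- skipped by both
      have hseen : x ∈ seen := (hinv x).mpr hmem
      have hA : dedupStep (seen, res) x = (seen, res) := by
        simp [dedupStep, PySem.Set.contains, hx, hseen]
      have hB : bareStep specific (emitted, res) x = (emitted, res) := by
        rcases hmem with h | h
        · simp [bareStep, PySem.Set.contains, h]
        · simp [bareStep, PySem.Set.contains, h]
      rw [hA, hB]
      exact ih specific seen emitted res hl' hinv
    · -- kept by both
      rw [not_or] at hmem
      have hseen : x ∉ seen := by rw [hinv x]; tauto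
      have hA : dedupStep (seen, res) x = (PySem.Set.add seen x, res ++ [x]) := by
        simp [dedupStep, PySem.Set.contains, hx, hseen]
      have hB : bareStep specific (emitted, res) x
          = (PySem.Set.add emitted x, res ++ [x]) := by
        simp [bareStep, PySem.Set.contains, hmem.1, hmem.2]
      rw [hA, hB]
      apply ih specific _ _ _ hl'
      intro y
      rw [PySem.Set.mem_add, PySem.Set.mem_add, hinv y]
      tauto

-- membership in A's accumulated seen_bases after a run of appended imports
theorem mem_foldl_addBase : ∀ (l : List String) (s0 : PySem.Set String) (y : String),
    y ∈ l.foldl (fun s x => PySem.Set.add s (pyBase x)) s0 ↔ y ∈ s0 ∨ y ∈ l.map pyBase := by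
  intro l
  induction l with
  | nil => intro s0 y; simp
  | cons a l ih =>
    intro s0 y
    simp only [List.foldl_cons]
    rw [ih]
    simp [PySem.Set.mem_add]
    tauto

-- ===== VERDICT (by name: the statement is the Claim_ definition above) =====
theorem deduplicate_imports_spec : Claim_equal_deduplicate_imports := by
  intro imports _
  unfold Spec_deduplicate_imports deduplicate_imports deduplicate_imports_alt
  by_cases hnil : imports = []
  · simp [hnil]
  · simp only [if_neg hnil]
    have hsorted : PySem.List.sorted imports (fun x => -(PySem.Str.count x "." : Int)) false
        = PySem.List.sorted (imports.filter (fun x => PySem.Str.count x "." != 0))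
            (fun x => -(PySem.Str.count x "." : Int)) false
          ++ imports.filter (fun x => !(PySem.Str.count x "." != 0)) := by
      rw [PySem.List.sorted_eq_foldl_insertBy, PySem.List.sorted_eq_foldl_insertBy]
      have h := sort_split imports [] [] (by simp)
      simpa using h
    rw [hsorted, List.foldl_append]
    have hdot : ∀ x ∈ PySem.List.sorted (imports.filter (fun x => PySem.Str.count x "." != 0))
        (fun x => -(PySem.Str.count x "." : Int)) false, PySem.Str.count x "." ≠ 0 := by
      intro x hx
      rw [PySem.List.mem_sorted] at hx
      have := (List.mem_filter.mp hx).2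
      simpa using this
    rw [phase1 _ (PySem.Set.empty, []) hdot]
    have hbare : imports.filter (fun x => PySem.Str.count x "." == 0)
        = imports.filter (fun x => !(PySem.Str.count x "." != 0)) := by
      apply List.filter_congr
      intro x _
      simp [bne]
    rw [hbare]
    simp only [List.nil_append]
    apply phase2
    · intro x hx
      have := (List.mem_filter.mp hx).2
      simpa [bne] using this
    · intro y
      rw [mem_foldl_addBase]
      simp [PySem.Set.mem_ofList, PySem.List.mem_sorted, PySem.Set.empty]
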